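-- pv_equiv track=rewrite | github.com/Suganya1990/DSA456_ | LAB01/lab1.py | sum_to_goal
-- ===== SOURCE A (Python) =====
-- def sum_to_goal(dataArr, target):
--     sumPair=[0,0]
--     product = 0
--
--     #Sort Array
--     sortedArr = sortArr(dataArr)
--     arrLen = len(sortedArr)
--
--     #find complemntary number that euquals target - array[n]
--     for i in range(arrLen):
--         complimentNum = target-sortedArr[i]
--
--         #then we search the array for that number
--         for j in range(arrLen):
--             if(complimentNum == sortedArr[j]):
--                 sumPair[0]=sortedArr[j]
--                 sumPair[1]=sortedArr[i]
--
--     product= sumPair[0]*sumPair[1]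
--     return product
--
-- def sortArr(data):
--     n = len(data)
--     i = 1
--     for i in range(n):
--         temp = data[i]
--         j = i-1
--         while temp < data[j] and j>=0:
--             data[j+1] = data[j]
--             j = j-1
--         data[j+1]= temp
--     return data
-- ===== SOURCE B (Python) =====
-- # Faster re-implementation: hash set + max candidate instead of sort + O(n^2) scan.
-- # Note: A sorts dataArr in place; B does not mutate its argument (return value is identical).
-- def sum_to_goal(dataArr, target):
--     values = set(dataArr)
--     candidates = [v for v in values if target - v in values]
--     if not candidates:
--         return 0
--     v = max(candidates)
--     return v * (target - v)
-- ===== Notes on version B (the rewrite author's own statement) =====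
-- stated objective: faster
-- what changed: Replaced insertion sort plus a quadratic double index scan by a hash set and a single pass picking the largest value whose complement is present (the pair A's last-match loop ends on), multiplying it with its complement.
import Mathlib
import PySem

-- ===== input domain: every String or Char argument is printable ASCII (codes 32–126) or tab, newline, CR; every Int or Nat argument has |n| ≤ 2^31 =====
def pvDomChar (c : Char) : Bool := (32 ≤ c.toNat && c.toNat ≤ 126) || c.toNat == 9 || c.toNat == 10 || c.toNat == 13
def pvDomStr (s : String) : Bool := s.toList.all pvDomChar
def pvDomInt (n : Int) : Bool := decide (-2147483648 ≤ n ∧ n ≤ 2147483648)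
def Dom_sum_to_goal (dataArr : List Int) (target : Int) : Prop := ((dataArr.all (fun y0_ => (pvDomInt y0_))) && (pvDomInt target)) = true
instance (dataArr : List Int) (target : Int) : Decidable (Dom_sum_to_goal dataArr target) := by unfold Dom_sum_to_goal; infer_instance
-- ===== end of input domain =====

-- B replaces A's insertion sort + quadratic double scan by a hash set and one pass picking
-- the largest value whose complement is present (objective: faster, O(n^2) -> O(n)).
-- A sorts dataArr in place (observable mutation); B does not mutate. Equivalence is about the return value.

-- ===== PORT A =====
-- inner while loop of sortArr: 'while temp < data[j] and j >= 0'; data[j] read with pyGet?.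
-- On every reachable state the read is in range (j ≥ -1 and the list nonempty when read),
-- so 'none' (which Python would raise on) never occurs; it is mapped to stopping the loop.
def pvInsertWhile (temp : Int) (data : List Int) (j : Int) : List Int × Int :=
  if h : ((PySem.List.pyGet? data j).elim false (fun x => decide (temp < x)) && decide (0 ≤ j)) = true then
    -- data[j+1] = data[j]; j = j - 1   (indices here are ≥ 0, so .toNat is exact)
    pvInsertWhile temp (data.set (j + 1).toNat (PySem.List.pyGetD data j 0)) (j - 1)
  else (data, j)
termination_by (j + 1).toNat
decreasing_by
  have h2 : 0 ≤ j := by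
    have := ((Bool.and_eq_true _ _).mp h).2
    simpa using this
  omega

-- body of the 'for i in range(n)' loop of sortArr
def pvSortStep (data : List Int) (i : Int) : List Int :=
  let temp := PySem.List.pyGetD data i 0        -- 0 ≤ i < len(data): in range
  let dj := pvInsertWhile temp data (i - 1)
  dj.1.set (dj.2 + 1).toNat temp                -- data[j+1] = temp, j+1 ≥ 0: exact

def sortArr (data : List Int) : List Int :=
  let n : Int := data.length
  (PySem.List.pyRange 0 n 1).foldl pvSortStep data

def sum_to_goal (dataArr : List Int) (target : Int) : Int :=
  let sumPair : Int × Int := (0, 0)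
  let sortedArr := sortArr dataArr
  let arrLen : Int := sortedArr.length
  let sumPair := (PySem.List.pyRange 0 arrLen 1).foldl (fun sp i =>
    let complimentNum := target - PySem.List.pyGetD sortedArr i 0   -- 0 ≤ i < len: in range
    (PySem.List.pyRange 0 arrLen 1).foldl (fun sp j =>
      if complimentNum = PySem.List.pyGetD sortedArr j 0 then
        (PySem.List.pyGetD sortedArr j 0, PySem.List.pyGetD sortedArr i 0)
      else sp) sp) sumPair
  sumPair.1 * sumPair.2

-- ===== PORT B =====
def sum_to_goal_alt (dataArr : List Int) (target : Int) : Int :=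
  let values : PySem.Set Int := PySem.Set.ofList dataArr
  let candidates := values.filter (fun v => PySem.Set.contains values (target - v))
  match PySem.List.max? candidates (fun y => y) with
  | none => 0
  | some v => v * (target - v)

-- ===== PRECONDITION & SPEC =====
def Spec_sum_to_goal (dataArr : List Int) (target : Int) (out : Int) : Prop := out = sum_to_goal_alt dataArr target
instance (dataArr : List Int) (target : Int) (out : Int) : Decidable (Spec_sum_to_goal dataArr target out) := by unfold Spec_sum_to_goal; infer_instance

-- ===== CLAIM (what is proved, stated in full; the proofs are below) =====
def Claim_equal_sum_to_goal : Prop := ∀ (dataArr : List Int) (target : Int), Dom_sum_to_goal dataArr target → Spec_sum_to_goal dataArr target (sum_to_goal dataArr target)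

-- ===== LEMMAS AND PROOFS =====

-- the shifted segment the while loop leaves behind (head of the run duplicated, first junk cell eaten)
def pvSeg (r junk : List Int) : List Int :=
  match r with
  | [] => junk
  | b :: r' => b :: (b :: r') ++ junk.tail

-- set at the boundary between two append parts
theorem pvSet_mid (q : List Int) (y : Int) (rest : List Int) (v : Int) :
    (q ++ y :: rest).set q.length v = q ++ v :: rest := by
  induction q with
  | nil => rfl
  | cons a q ih => simp [ih]

-- everything dropWhile (· ≤ t) keeps of a sorted list is > t
theorem pvDropWhile_gt (t : Int) : ∀ (p : List Int), p.Pairwise (· ≤ ·) →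
    ∀ x ∈ p.dropWhile (fun a => decide (a ≤ t)), t < x := by
  intro p
  induction p with
  | nil => simp
  | cons a p ih =>
      intro hp x hx
      rw [List.pairwise_cons] at hp
      by_cases hat : a ≤ t
      · rw [List.dropWhile_cons_of_pos (by simpa using hat)] at hx
        exact ih hp.2 x hx
      · rw [List.dropWhile_cons_of_neg (by simpa using hat)] at hx
        rcases List.mem_cons.mp hx with rfl | hx
        · omega
        · exact lt_of_lt_of_le (by omega) (hp.1 x hx)

-- spec of the while loop: sorted prefix p, nonempty junk behind it
theorem pvInsertWhile_spec (p : List Int) (t : Int) :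
    p.Pairwise (· ≤ ·) → ∀ (junk : List Int), junk ≠ [] →
    pvInsertWhile t (p ++ junk) ((p.length : Int) - 1) =
      (p.takeWhile (fun a => decide (a ≤ t)) ++ pvSeg (p.dropWhile (fun a => decide (a ≤ t))) junk,
       ((p.takeWhile (fun a => decide (a ≤ t))).length : Int) - 1) := by
  induction p using List.reverseRecOn with
  | nil =>
      intro _ junk hj
      rw [pvInsertWhile]
      norm_num [pvSeg]
  | append_singleton p' a ih =>
      intro hs junk hj
      rw [List.pairwise_append] at hs
      obtain ⟨hs', -, hall⟩ := hs
      have hall' : ∀ x ∈ p', x ≤ a := fun x hx => hall x hx a (by simp)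
      have hidx : ((p' ++ [a]).length : Int) - 1 = (p'.length : Int) := by
        simp
      have hget : PySem.List.pyGet? ((p' ++ [a]) ++ junk) ((p'.length : Int)) = some a := by
        rw [PySem.List.pyGet?_natCast, List.getElem?_append_left (by simp),
          List.getElem?_concat_length]
      rw [hidx, pvInsertWhile, hget]
      by_cases hta : t < a
      · -- shift a one cell right, recurse on p'
        cases junk with
        | nil => exact absurd rfl hj
        | cons x junk' =>
          have hcond : ((some a).elim false (fun x => decide (t < x)) &&
              decide (0 ≤ (p'.length : Int))) = true := by
            simp [hta]
          rw [dif_pos hcond]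
          have hgetD : PySem.List.pyGetD ((p' ++ [a]) ++ x :: junk') ((p'.length : Int)) 0 = a := by
            rw [PySem.List.pyGetD_natCast, List.getD_eq_getElem?_getD,
              List.getElem?_append_left (by simp), List.getElem?_concat_length]
            rfl
          have htn : (((p'.length : Int)) + 1).toNat = (p' ++ [a]).length := by
            simp
          have hset : ((p' ++ [a]) ++ x :: junk').set ((p' ++ [a]).length) a
              = p' ++ (a :: a :: junk') := by
            rw [pvSet_mid]
            simp
          rw [hgetD, htn, hset]
          have hrec := ih hs' (a :: a :: junk') (by simp)
          rw [show (p'.length : Int) - 1 = (p'.length : Int) - 1 from rfl, hrec]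
          have hfa : (fun a0 => decide (a0 ≤ t)) a = false := by simp; omega
          have htw : (p' ++ [a]).takeWhile (fun a0 => decide (a0 ≤ t))
              = p'.takeWhile (fun a0 => decide (a0 ≤ t)) := by
            rw [List.takeWhile_append]
            split_ifs with hlen
            · have heq : p'.takeWhile (fun a0 => decide (a0 ≤ t)) = p' :=
                (List.takeWhile_prefix _).eq_of_length hlen
              simp [heq, hfa]
            · rfl
          have hdw : (p' ++ [a]).dropWhile (fun a0 => decide (a0 ≤ t))
              = p'.dropWhile (fun a0 => decide (a0 ≤ t)) ++ [a] := by
            rw [List.dropWhile_append]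
            split_ifs with hlen
            · rw [List.isEmpty_iff] at hlen
              rw [hlen]
              simp [hfa]
            · rfl
          rw [htw, hdw]
          cases hr : p'.dropWhile (fun a0 => decide (a0 ≤ t)) with
          | nil => simp [pvSeg]
          | cons b r'' => simp [pvSeg]
      · -- a ≤ t: the loop does not move, the whole prefix stays
        have hcond : ((some a).elim false (fun x => decide (t < x)) &&
            decide (0 ≤ (p'.length : Int))) = false := by
          simp [hta]
        rw [dif_neg (by rw [hcond]; simp)]
        have hallle : ∀ x ∈ p' ++ [a], (fun a0 => decide (a0 ≤ t)) x = true := by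
          intro x hx
          rcases List.mem_append.mp hx with hx | hx
          · simp; exact le_trans (hall' x hx) (by omega)
          · rcases List.mem_singleton.mp hx with rfl; simp; omega
        have htw : (p' ++ [a]).takeWhile (fun a0 => decide (a0 ≤ t)) = p' ++ [a] :=
          List.takeWhile_eq_self_iff.mpr hallle
        have hdw : (p' ++ [a]).dropWhile (fun a0 => decide (a0 ≤ t)) = [] :=
          List.dropWhile_eq_nil_iff.mpr hallle
        rw [htw, hdw, hidx]
        rfl

-- spec of one outer insertion step: insert t into the sorted prefix p
theorem pvSortStep_spec (p : List Int) (t : Int) (s : List Int) (hs : p.Pairwise (· ≤ ·)) :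
    pvSortStep (p ++ t :: s) ((p.length : Int)) =
      p.takeWhile (fun a => decide (a ≤ t)) ++ t :: (p.dropWhile (fun a => decide (a ≤ t)) ++ s) := by
  have hgetD : PySem.List.pyGetD (p ++ t :: s) ((p.length : Int)) 0 = t := by
    rw [PySem.List.pyGetD_natCast, List.getD_eq_getElem?_getD,
      List.getElem?_append_right le_rfl]
    simp
  unfold pvSortStep
  simp only [hgetD]
  rw [pvInsertWhile_spec p t hs (t :: s) (by simp)]
  have htn : (((p.takeWhile (fun a => decide (a ≤ t))).length : Int) - 1 + 1).toNat
      = (p.takeWhile (fun a => decide (a ≤ t))).length := by omega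
  rw [htn]
  cases hr : p.dropWhile (fun a => decide (a ≤ t)) with
  | nil =>
      simp only [pvSeg, pvSet_mid]
      simp
  | cons b r' =>
      simp only [pvSeg, List.tail_cons, List.cons_append]
      exact pvSet_mid _ b (b :: (r' ++ s)) t

-- loop invariant of sortArr's outer for-loop
theorem pvSortFold (data : List Int) : ∀ (k : Nat), k ≤ data.length →
    ∃ p : List Int, (PySem.List.pyRange 0 (k : Int) 1).foldl pvSortStep data = p ++ data.drop k ∧
      p.Perm (data.take k) ∧ p.Pairwise (· ≤ ·) := by
  intro k
  induction k with
  | zero =>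
      intro _
      exact ⟨[], by simp [PySem.List.pyRange_one_eq_nil le_rfl], by simp, List.Pairwise.nil⟩
  | succ k ih =>
      intro hk
      obtain ⟨p, heq, hperm, hsort⟩ := ih (Nat.le_of_succ_le hk)
      have hk' : k < data.length := hk
      have hlenp : p.length = k := by
        have := hperm.length_eq
        simp [Nat.min_eq_left hk'.le] at this
        exact this
      rw [show ((k + 1 : Nat) : Int) = (k : Int) + 1 by push_cast; ring,
        PySem.List.pyRange_one_succ_right (by positivity), List.foldl_append, heq]
      have hdrop : data.drop k = data[k] :: data.drop (k + 1) := List.drop_eq_getElem_cons hk'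
      rw [hdrop]
      simp only [List.foldl_cons, List.foldl_nil]
      have hstep := pvSortStep_spec p (data[k]) (data.drop (k + 1)) hsort
      rw [hlenp] at hstep
      rw [hstep]
      set f : Int → Bool := fun a => decide (a ≤ data[k]) with hf
      refine ⟨p.takeWhile f ++ data[k] :: p.dropWhile f, by simp, ?_, ?_⟩
      · -- permutation of take (k+1)
        have h1 : (p.takeWhile f ++ data[k] :: p.dropWhile f).Perm (data[k] :: p) := by
          have := List.perm_middle (a := data[k]) (l₁ := p.takeWhile f) (l₂ := p.dropWhile f)
          simpa [List.takeWhile_append_dropWhile] using this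
        have h2 : (data[k] :: p).Perm (data[k] :: data.take k) := List.Perm.cons _ hperm
        have h3 : (data[k] :: data.take k).Perm (data.take k ++ [data[k]]) :=
          (List.perm_append_singleton _ _).symm
        have h4 : data.take (k + 1) = data.take k ++ [data[k]] := by
          rw [List.take_add_one]
          simp [List.getElem?_eq_getElem hk']
        rw [h4]
        exact (h1.trans h2).trans h3
      · -- sortedness
        have hq : (p.takeWhile f).Pairwise (· ≤ ·) :=
          List.Pairwise.sublist (List.takeWhile_sublist f) hsort
        have hr : (p.dropWhile f).Pairwise (· ≤ ·) :=
          List.Pairwise.sublist (List.dropWhile_sublist f) hsort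
        have hqle : ∀ x ∈ p.takeWhile f, x ≤ data[k] := by
          intro x hx
          have := List.mem_takeWhile_imp hx
          rw [hf] at this
          simpa using this
        have hrge : ∀ x ∈ p.dropWhile f, data[k] ≤ x := by
          intro x hx
          exact le_of_lt (pvDropWhile_gt (data[k]) p hsort x hx)
        rw [List.pairwise_append]
        refine ⟨hq, ?_, ?_⟩
        · rw [List.pairwise_cons]
          exact ⟨hrge, hr⟩
        · intro x hx y hy
          rcases List.mem_cons.mp hy with rfl | hy
          · exact hqle x hx
          · exact le_trans (hqle x hx) (hrge y hy)

theorem sortArr_perm_sorted (data : List Int) :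
    (sortArr data).Perm data ∧ (sortArr data).Pairwise (· ≤ ·) := by
  obtain ⟨p, heq, hperm, hsort⟩ := pvSortFold data data.length le_rfl
  have : sortArr data = p := by
    unfold sortArr
    simpa using heq
  rw [this]
  exact ⟨by simpa using hperm, hsort⟩

-- the inner 'for j' scan: if the complement occurs anywhere, the pair becomes (c, v)
theorem pvInnerFold (c v : Int) (l : List Int) : ∀ sp : Int × Int,
    l.foldl (fun sp x => if c = x then (x, v) else sp) sp = if c ∈ l then (c, v) else sp := by
  induction l with
  | nil => simp
  | cons a l ih =>
      intro sp
      rw [List.foldl_cons, ih]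
      by_cases h : c = a
      · subst h
        simp
      · simp [h]

theorem pvInnerIndexed (l : List Int) (c v : Int) (sp : Int × Int) :
    (PySem.List.pyRange 0 ((l.length : Int)) 1).foldl
      (fun sp j => if c = PySem.List.pyGetD l j 0 then (PySem.List.pyGetD l j 0, v) else sp) sp
    = if c ∈ l then (c, v) else sp := by
  rw [PySem.List.foldl_pyRange_zero_pyGetD' l 0
    (fun sp x => if c = x then (x, v) else sp) sp]
  exact pvInnerFold c v l sp

-- the outer 'for i' scan keeps the LAST hit
theorem pvOuterFold (target : Int) (l' : List Int) : ∀ (l : List Int) (sp : Int × Int),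
    l.foldl (fun sp v => if (target - v) ∈ l' then (target - v, v) else sp) sp =
      (l.filter (fun v => decide ((target - v) ∈ l'))).getLast?.elim sp (fun v => (target - v, v)) := by
  intro l
  induction l using List.reverseRecOn with
  | nil => intro sp; simp
  | append_singleton l a ih =>
      intro sp
      rw [List.foldl_append, List.filter_append, ih]
      by_cases h : (target - a) ∈ l'
      · simp [h]
      · simp [h]

-- the last element of a ≤-sorted list bounds every element
theorem pvGetLast_isMax (xs : List Int) : xs.Pairwise (· ≤ ·) →
    ∀ v, xs.getLast? = some v → ∀ x ∈ xs, x ≤ v := by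
  induction xs using List.reverseRecOn with
  | nil => intro _ v hv; simp at hv
  | append_singleton l a ih =>
      intro hs v hv x hx
      rw [List.getLast?_concat] at hv
      obtain rfl : v = a := by injection hv with h; exact h.symm
      rw [List.pairwise_append] at hs
      rcases List.mem_append.mp hx with hx | hx
      · exact hs.2.2 x hx _ (by simp)
      · rcases List.mem_singleton.mp hx with rfl
        exact le_rfl

-- ===== VERDICT (by name: the statement is the Claim_ definition above) =====
theorem sum_to_goal_spec : Claim_equal_sum_to_goal := by
  intro dataArr target _
  unfold Spec_sum_to_goal
  obtain ⟨hperm, hsort⟩ := sortArr_perm_sorted dataArr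
  unfold sum_to_goal sum_to_goal_alt
  simp only []
  set l := sortArr dataArr with hl
  rw [PySem.List.foldl_pyRange_zero_pyGetD' l 0
    (fun sp v => List.foldl
      (fun sp j => if target - v = PySem.List.pyGetD l j 0 then (PySem.List.pyGetD l j 0, v) else sp)
      sp (PySem.List.pyRange 0 ((l.length : Int)))) ((0 : Int), (0 : Int))]
  simp only [pvInnerIndexed]
  rw [pvOuterFold target l l ((0 : Int), (0 : Int))]
  set cl := l.filter (fun v => decide ((target - v) ∈ l)) with hclq
  set cands := (PySem.Set.ofList dataArr).filter
    (fun v => (PySem.Set.ofList dataArr).contains (target - v)) with hcandsq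
  have hclsort : cl.Pairwise (· ≤ ·) := List.Pairwise.sublist List.filter_sublist hsort
  have hcc : ∀ x : Int, x ∈ cl ↔ x ∈ cands := by
    intro x
    rw [hclq, hcandsq]
    simp [List.mem_filter, hperm.mem_iff, PySem.Set.mem_ofList]
  rcases hcl : cl.getLast? with - | v
  · -- no pair exists on either side
    have h1 : cl = [] := List.getLast?_eq_none_iff.mp hcl
    have h2 : cands = [] := by
      rw [List.eq_nil_iff_forall_not_mem]
      intro x hx
      have := (hcc x).mpr hx
      rw [h1] at this
      exact List.not_mem_nil this
    have h3 : PySem.List.max? cands (fun y => y) = none :=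
      (PySem.List.max?_eq_none_iff _ _).mpr h2
    rw [h3]
    rfl
  · -- a pair exists: A keeps the last (= largest) hit, B the max candidate
    have hvcl : v ∈ cl := List.mem_of_getLast? hcl
    have hvcands : v ∈ cands := (hcc v).mp hvcl
    rcases hm : PySem.List.max? cands (fun y => y) with - | m
    · rw [(PySem.List.max?_eq_none_iff _ _).mp hm] at hvcands
      exact absurd hvcands (List.not_mem_nil)
    · have hm1 : m ∈ cands := PySem.List.max?_mem hm
      have hvm : v ≤ m := PySem.List.max?_isMax hm v hvcands
      have hmv : m ≤ v := pvGetLast_isMax cl hclsort v hcl m ((hcc m).mpr hm1)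
      obtain rfl : v = m := le_antisymm hvm hmv
      show (target - v) * v = v * (target - v)
      ring
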